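-- pv_equiv track=rewrite | github.com/SonjaKra/GraphHomomorphisms | GraphUtil.py | create_adjacency_matrix_and_list_2
-- ===== SOURCE A (Python) =====
-- import copy
--
-- def create_adjacency_matrix_and_list_2(adjacency_matrix,adjacency_list):
--     adjacency_matrix_2 = copy.deepcopy(adjacency_matrix)
--     adjacency_list_2 = copy.deepcopy(adjacency_list)
--     for i in range(len(adjacency_matrix)):
--         for j in range(i+1,len(adjacency_matrix)):
--             if adjacency_matrix[i][j]==0:
--                 for k in range(len(adjacency_matrix)):
--                     if adjacency_matrix[i][k] == 1 and adjacency_matrix[k][j]==1: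
--                         adjacency_matrix_2[i][j] = 1
--                         adjacency_matrix_2[j][i] = 1
--                         adjacency_list_2[i].append(j)
--                         # increase degree
--                         adjacency_list_2[i][0] += 1
--                         adjacency_list_2[j].append(i)
--                         #increase degree
--                         adjacency_list_2[j][0] += 1
--                         break
--     return [adjacency_matrix_2,adjacency_list_2]
-- ===== SOURCE B (Python) =====
-- def create_adjacency_matrix_and_list_2(adjacency_matrix, adjacency_list):
--     n = len(adjacency_matrix)
--     # bitmask per row (bit j set iff M[i][j] == 1) and per column (bit i set iff M[i][j] == 1)
--     row_mask = []
--     for i in range(n):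
--         m = 0
--         for j in range(n):
--             if adjacency_matrix[i][j] == 1:
--                 m |= 1 << j
--         row_mask.append(m)
--     col_mask = []
--     for j in range(n):
--         m = 0
--         for i in range(n):
--             if adjacency_matrix[i][j] == 1:
--                 m |= 1 << i
--         col_mask.append(m)
--     # a pair (i, j) gains an edge iff the masks intersect: one bitwise AND per pair
--     new_edges = [(i, j) for i in range(n) for j in range(i + 1, n)
--                  if adjacency_matrix[i][j] == 0 and (row_mask[i] & col_mask[j]) != 0]
--     matrix_2 = [list(row) for row in adjacency_matrix]
--     list_2 = [list(row) for row in adjacency_list]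
--     for i, j in new_edges:
--         matrix_2[i][j] = 1
--         matrix_2[j][i] = 1
--         list_2[i].append(j)
--         list_2[i][0] += 1
--         list_2[j].append(i)
--         list_2[j][0] += 1
--     return [matrix_2, list_2]
-- ===== Notes on version B (the rewrite author's own statement) =====
-- stated objective: faster
-- what changed: A's inner linear scan over all k for a common neighbour of i and j is replaced by precomputed per-row and per-column integer bitmasks, so each pair (i,j) is decided by one bitwise AND.
-- outside the precondition, e.g. on create_adjacency_matrix_and_list_2([[1, 1], [1]], [[0], [0]]): A returns [[[1, 1], [1]], [[0], [0]]], B raises IndexError; on create_adjacency_matrix_and_list_2([[0, 1], [1, 0]], []): A returns [[[0, 1], [1, 0]], []], B returns [[[0, 1], [1, 0]], []]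
import Mathlib
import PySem

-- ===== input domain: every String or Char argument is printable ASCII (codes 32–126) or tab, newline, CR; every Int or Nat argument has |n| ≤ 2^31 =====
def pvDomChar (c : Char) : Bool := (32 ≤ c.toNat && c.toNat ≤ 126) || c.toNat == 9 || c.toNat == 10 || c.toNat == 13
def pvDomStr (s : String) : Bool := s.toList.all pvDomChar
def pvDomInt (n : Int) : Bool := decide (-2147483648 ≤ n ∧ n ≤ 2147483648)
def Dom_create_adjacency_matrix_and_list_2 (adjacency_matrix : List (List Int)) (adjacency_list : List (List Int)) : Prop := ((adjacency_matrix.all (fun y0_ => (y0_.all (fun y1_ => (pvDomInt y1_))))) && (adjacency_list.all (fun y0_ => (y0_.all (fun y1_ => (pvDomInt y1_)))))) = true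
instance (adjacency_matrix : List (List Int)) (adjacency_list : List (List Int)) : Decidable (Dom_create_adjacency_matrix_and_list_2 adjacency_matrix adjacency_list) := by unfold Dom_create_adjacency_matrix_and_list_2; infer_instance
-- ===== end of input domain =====

-- B replaces A's inner linear scan for a common neighbour by precomputed row/column bitmasks:
-- it collects the new-edge pairs with one bitwise AND per pair, then applies all updates
-- (objective: faster by word-level bit-parallelism).

-- matrix read M[i][j] (indices produced by range loops, always in range under Pre_)
def mget (M : List (List Int)) (i j : Nat) : Int := (M.getD i []).getD j 0

-- the six updates both Pythons perform when pair (i, j) gains an edge (shared by both ports)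
def addEdge (st : List (List Int) × List (List Int)) (i j : Nat) : List (List Int) × List (List Int) :=
  let m2 := st.1.set i ((st.1.getD i []).set j 1)
  let m2 := m2.set j ((m2.getD j []).set i 1)
  let ri := (st.2.getD i []) ++ [(j : Int)]
  let ri := ri.set 0 (ri.getD 0 0 + 1)
  let l2 := st.2.set i ri
  let rj := (l2.getD j []) ++ [(i : Int)]
  let rj := rj.set 0 (rj.getD 0 0 + 1)
  (m2, l2.set j rj)

-- ===== PORT A =====
def create_adjacency_matrix_and_list_2 (adjacency_matrix : List (List Int)) (adjacency_list : List (List Int)) : List (List (List Int)) :=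
  let n := adjacency_matrix.length
  let st := (List.range n).foldl (fun st i =>
    (List.range' (i+1) (n - i - 1)).foldl (fun st j =>
      if mget adjacency_matrix i j == 0 then
        -- 'for k in range(n): if …: <updates>; break' — the first matching k triggers the updates
        match (List.range n).find? (fun k =>
            (mget adjacency_matrix i k == 1) && (mget adjacency_matrix k j == 1)) with
        | some _ => addEdge st i j
        | none => st
      else st) st) (adjacency_matrix, adjacency_list)
  [st.1, st.2]

-- ===== PORT B =====
def create_adjacency_matrix_and_list_2_alt (adjacency_matrix : List (List Int)) (adjacency_list : List (List Int)) : List (List (List Int)) :=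
  let n := adjacency_matrix.length
  let row_mask := (List.range n).map (fun i =>
    (List.range n).foldl (fun m j => if mget adjacency_matrix i j == 1 then m ||| ((1:Nat) <<< j) else m) 0)
  let col_mask := (List.range n).map (fun j =>
    (List.range n).foldl (fun m i => if mget adjacency_matrix i j == 1 then m ||| ((1:Nat) <<< i) else m) 0)
  let new_edges := (List.range n).flatMap (fun i =>
    ((List.range' (i+1) (n - i - 1)).filter (fun j =>
      (mget adjacency_matrix i j == 0) && (row_mask.getD i 0 &&& col_mask.getD j 0 != 0))).map (fun j => (i, j)))
  let st := new_edges.foldl (fun st p => addEdge st p.1 p.2) (adjacency_matrix, adjacency_list)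
  [st.1, st.2]

-- ===== PRECONDITION & SPEC =====
-- Pre_ excludes ragged/short inputs (a matrix row shorter than the matrix, or an adjacency
-- list shorter than the matrix), on which Python A raises IndexError as soon as a pair/edge
-- reaches the missing entry; on those of such inputs where no entry is ever reached A still
-- happens to return, and B either returns the same value or raises IndexError while building
-- its masks.
def Pre_create_adjacency_matrix_and_list_2 (adjacency_matrix : List (List Int)) (adjacency_list : List (List Int)) : Prop :=
  (∀ row ∈ adjacency_matrix, adjacency_matrix.length ≤ row.length) ∧
  adjacency_matrix.length ≤ adjacency_list.length
instance (adjacency_matrix : List (List Int)) (adjacency_list : List (List Int)) : Decidable (Pre_create_adjacency_matrix_and_list_2 adjacency_matrix adjacency_list) := by unfold Pre_create_adjacency_matrix_and_list_2; infer_instance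
def pvWitness_create_adjacency_matrix_and_list_2 : List (List Int) × List (List Int) :=
  ([[0, 1, 0], [1, 0, 1], [0, 1, 0]], [[1, 1], [2, 0, 2], [1, 1]])

def Spec_create_adjacency_matrix_and_list_2 (adjacency_matrix : List (List Int)) (adjacency_list : List (List Int)) (out : List (List (List Int))) : Prop := out = create_adjacency_matrix_and_list_2_alt adjacency_matrix adjacency_list
instance (adjacency_matrix : List (List Int)) (adjacency_list : List (List Int)) (out : List (List (List Int))) : Decidable (Spec_create_adjacency_matrix_and_list_2 adjacency_matrix adjacency_list out) := by unfold Spec_create_adjacency_matrix_and_list_2; infer_instance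

-- ===== CLAIM (what is proved, stated in full; the proofs are below) =====
def Claim_equal_create_adjacency_matrix_and_list_2 : Prop := ∀ (adjacency_matrix : List (List Int)) (adjacency_list : List (List Int)), Dom_create_adjacency_matrix_and_list_2 adjacency_matrix adjacency_list → Pre_create_adjacency_matrix_and_list_2 adjacency_matrix adjacency_list → Spec_create_adjacency_matrix_and_list_2 adjacency_matrix adjacency_list (create_adjacency_matrix_and_list_2 adjacency_matrix adjacency_list)

-- ===== LEMMAS AND PROOFS =====

-- bits of the or-accumulating fold
theorem testBit_foldl_or (l : List Nat) (m k : Nat) :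
    (l.foldl (fun a b => a ||| ((1:Nat) <<< b)) m).testBit k
      = (m.testBit k || decide (k ∈ l)) := by
  induction l generalizing m with
  | nil => simp
  | cons b t ih =>
    have h1 : ((1:Nat) <<< b) = 2 ^ b := by simp [Nat.shiftLeft_eq]
    simp only [List.foldl_cons, ih, Nat.testBit_or, h1, Nat.testBit_two_pow, List.mem_cons]
    by_cases hbk : b = k
    · subst hbk; simp
    · simp [hbk, Ne.symm hbk]

-- bits of a row/column mask as built by port B
theorem testBit_mask (n k : Nat) (p : Nat → Bool) :
    ((List.range n).foldl (fun m b => if p b then m ||| ((1:Nat) <<< b) else m) 0).testBit k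
      = (decide (k < n) && p k) := by
  rw [PySem.List.foldl_if_eq_foldl_filter]
  rw [testBit_foldl_or]
  simp [List.mem_filter]

theorem nat_ne_zero_iff_testBit (x : Nat) : x ≠ 0 ↔ ∃ k, x.testBit k = true := by
  constructor
  · exact Nat.exists_testBit_of_ne_zero
  · rintro ⟨k, hk⟩ rfl
    simp at hk

-- the condition equivalence: A's first-common-neighbour scan succeeds iff the masks intersect
theorem cond_eq (M : List (List Int)) (n i j : Nat) (hi : i < n) (hj : j < n) :
    (((List.range n).find? (fun k =>
        (mget M i k == 1) && (mget M k j == 1))).isSome : Bool)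
      = ((((List.range n).map (fun i =>
            (List.range n).foldl (fun m j => if mget M i j == 1 then m ||| ((1:Nat) <<< j) else m) 0)).getD i 0
          &&&
          ((List.range n).map (fun j =>
            (List.range n).foldl (fun m i => if mget M i j == 1 then m ||| ((1:Nat) <<< i) else m) 0)).getD j 0)
          != 0) := by
  have hrow : ((List.range n).map (fun i =>
      (List.range n).foldl (fun m j => if mget M i j == 1 then m ||| ((1:Nat) <<< j) else m) 0)).getD i 0
      = (List.range n).foldl (fun m j => if mget M i j == 1 then m ||| ((1:Nat) <<< j) else m) 0 := by
    rw [List.getD_eq_getElem?_getD, List.getElem?_map, List.getElem?_range hi]; rfl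
  have hcol : ((List.range n).map (fun j =>
      (List.range n).foldl (fun m i => if mget M i j == 1 then m ||| ((1:Nat) <<< i) else m) 0)).getD j 0
      = (List.range n).foldl (fun m i => if mget M i j == 1 then m ||| ((1:Nat) <<< i) else m) 0 := by
    rw [List.getD_eq_getElem?_getD, List.getElem?_map, List.getElem?_range hj]; rfl
  rw [hrow, hcol]
  have htb : ∀ k : Nat,
      (((List.range n).foldl (fun m j => if mget M i j == 1 then m ||| ((1:Nat) <<< j) else m) 0)
        &&& ((List.range n).foldl (fun m i => if mget M i j == 1 then m ||| ((1:Nat) <<< i) else m) 0)).testBit k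
      = (decide (k < n) && ((mget M i k == 1) && (mget M k j == 1))) := by
    intro k
    rw [Nat.testBit_and, testBit_mask n k (fun b => mget M i b == 1),
        testBit_mask n k (fun b => mget M b j == 1)]
    cases decide (k < n) <;> cases hx : (mget M i k == 1) <;> simp
  rcases hfind : (List.range n).find? (fun k => (mget M i k == 1) && (mget M k j == 1)) with _ | k
  · -- no k found: the masks do not intersect
    have hz : (((List.range n).foldl (fun m j => if mget M i j == 1 then m ||| ((1:Nat) <<< j) else m) 0)
        &&& ((List.range n).foldl (fun m i => if mget M i j == 1 then m ||| ((1:Nat) <<< i) else m) 0)) = 0 := by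
      apply Nat.eq_of_testBit_eq
      intro k
      rw [htb k, Nat.zero_testBit]
      rcases hkn : decide (k < n) with _ | _
      · simp
      · have hk : k < n := of_decide_eq_true hkn
        have := List.find?_eq_none.mp hfind k (List.mem_range.mpr hk)
        simp [this]
    rw [hz]
    rfl
  · -- k found: bit k is in both masks
    have hp := List.find?_some hfind
    have hk : k < n := List.mem_range.mp (List.mem_of_find?_eq_some hfind)
    have : (((List.range n).foldl (fun m j => if mget M i j == 1 then m ||| ((1:Nat) <<< j) else m) 0)
        &&& ((List.range n).foldl (fun m i => if mget M i j == 1 then m ||| ((1:Nat) <<< i) else m) 0)) ≠ 0 := by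
      rw [nat_ne_zero_iff_testBit]
      exact ⟨k, by rw [htb k]; simp [hk, hp]⟩
    simp only [Option.isSome_some]
    exact (bne_iff_ne.mpr this).symm

-- A's nested conditional fold equals B's fold of addEdge over the collected pair list
theorem fold_eq (M L : List (List Int)) :
    (List.range M.length).foldl (fun st i =>
      (List.range' (i+1) (M.length - i - 1)).foldl (fun st j =>
        if mget M i j == 0 then
          match (List.range M.length).find? (fun k =>
              (mget M i k == 1) && (mget M k j == 1)) with
          | some _ => addEdge st i j
          | none => st
        else st) st) (M, L)
    = ((List.range M.length).flatMap (fun i =>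
        ((List.range' (i+1) (M.length - i - 1)).filter (fun j =>
          (mget M i j == 0) &&
          (((List.range M.length).map (fun i =>
              (List.range M.length).foldl (fun m j => if mget M i j == 1 then m ||| ((1:Nat) <<< j) else m) 0)).getD i 0
            &&&
            ((List.range M.length).map (fun j =>
              (List.range M.length).foldl (fun m i => if mget M i j == 1 then m ||| ((1:Nat) <<< i) else m) 0)).getD j 0
            != 0))).map (fun j => (i, j)))).foldl
        (fun st p => addEdge st p.1 p.2) (M, L) := by
  rw [List.foldl_flatMap]
  apply PySem.List.foldl_congr_mem
  intro st i hi
  rw [List.foldl_map, ← PySem.List.foldl_if_eq_foldl_filter]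
  apply PySem.List.foldl_congr_mem
  intro st' j hj
  have hin : i < M.length := List.mem_range.mp hi
  have hjn : j < M.length := by
    have := List.mem_range'_1.mp hj
    omega
  have hc := cond_eq M M.length i j hin hjn
  cases h0 : (mget M i j == 0)
  · simp
  · rcases hf : (List.range M.length).find? (fun k =>
        (mget M i k == 1) && (mget M k j == 1)) with _ | k
    · rw [hf] at hc
      simp only [Option.isSome_none] at hc
      rw [← hc]
      simp
    · rw [hf] at hc
      simp only [Option.isSome_some] at hc
      rw [← hc]
      simp

-- ===== VERDICT (by name: the statement is the Claim_ definition above) =====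
theorem create_adjacency_matrix_and_list_2_spec : Claim_equal_create_adjacency_matrix_and_list_2 := by
  intro M L _ _
  unfold Spec_create_adjacency_matrix_and_list_2
  unfold create_adjacency_matrix_and_list_2 create_adjacency_matrix_and_list_2_alt
  simp only []
  rw [fold_eq M L]
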